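-- pv_equiv track=rewrite | github.com/merlin2181/RegexEngine | Regex Engine/task/regex/regex.py | match_func
-- ===== SOURCE A (Python) =====
-- def match_func(pattern, search_str):
--     """
--     Function that cycles through a regex pattern and search string to see if it can find the
--     pattern in the search string.  If it does, the function returns True. If it doesn't the
--     function returns False.
--     :pattern: the pattern to search for in the user inputted search string
--     :search_str: the user inputted search string
--     :return: True, False or goes into recursion offsetting either both the pattern and search_str or just the search_str
--     """
--     if not pattern:
--         return True
--     if not search_str:
--         return False
--     if pattern[0] == search_str[0] or pattern[0] == '.':
--         return match_func(pattern[1:], search_str[1:])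
--     else:
--         return match_func(pattern, search_str[1:])
-- ===== SOURCE B (Python) =====
-- def match_func(pattern, search_str):
--     """Two-pointer iterative scan: i indexes the pattern; greedily advance it
--     over the search string (pattern char '.' matches any char)."""
--     i = 0
--     for ch in search_str:
--         if i < len(pattern) and (pattern[i] == ch or pattern[i] == '.'):
--             i += 1
--     return i == len(pattern)
-- ===== Notes on version B (the rewrite author's own statement) =====
-- stated objective: faster
-- what changed: Replaced the recursive slicing implementation (each step copies pattern/search suffixes) by a single iterative two-pointer scan over the search string using an index into the pattern.
import Mathlib
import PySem

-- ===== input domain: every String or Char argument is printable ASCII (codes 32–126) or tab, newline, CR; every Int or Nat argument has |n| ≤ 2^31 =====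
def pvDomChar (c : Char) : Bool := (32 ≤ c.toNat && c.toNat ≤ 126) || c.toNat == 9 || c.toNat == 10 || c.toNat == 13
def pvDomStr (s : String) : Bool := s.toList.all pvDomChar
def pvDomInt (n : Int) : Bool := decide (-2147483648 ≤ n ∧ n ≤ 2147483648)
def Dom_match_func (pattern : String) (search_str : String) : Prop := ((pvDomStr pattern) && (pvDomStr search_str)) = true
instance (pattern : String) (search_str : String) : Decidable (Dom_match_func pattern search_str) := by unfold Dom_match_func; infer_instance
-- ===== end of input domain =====

-- B replaces A's recursive slicing by one iterative index-based scan (faster: no suffix copies); return values agree everywhere.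

-- ===== PORT A =====
-- A recurses on the two strings: empty pattern → True, empty search → False,
-- heads match (or pattern head '.') → drop both heads, else drop the search head.
def matchARec : List Char → List Char → Bool
  | [], _ => true
  | _ :: _, [] => false
  | p :: ps, c :: cs =>
      if p == c || p == '.' then matchARec ps cs
      else matchARec (p :: ps) cs
termination_by _ s => s.length

def match_func (pattern : String) (search_str : String) : Bool :=
  matchARec pattern.toList search_str.toList

-- ===== PORT B =====
-- one step of B's for-loop: advance i iff i < len(pattern) and pattern[i] matches ch
def altStep (p : List Char) (i : Nat) (ch : Char) : Nat :=
  match p[i]? with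
  | some pc => if pc == ch || pc == '.' then i + 1 else i
  | none => i

def match_func_alt (pattern : String) (search_str : String) : Bool :=
  (search_str.toList.foldl (altStep pattern.toList) 0) == pattern.toList.length

-- ===== PRECONDITION & SPEC =====
def Spec_match_func (pattern : String) (search_str : String) (out : Bool) : Prop := out = match_func_alt pattern search_str
instance (pattern : String) (search_str : String) (out : Bool) : Decidable (Spec_match_func pattern search_str out) := by unfold Spec_match_func; infer_instance

-- ===== CLAIM (what is proved, stated in full; the proofs are below) =====
def Claim_equal_match_func : Prop := ∀ (pattern : String) (search_str : String), Dom_match_func pattern search_str → Spec_match_func pattern search_str (match_func pattern search_str)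

-- ===== LEMMAS AND PROOFS =====

-- once the pattern index has reached the end, the fold never moves it
theorem foldl_altStep_full (p : List Char) (s : List Char) :
    s.foldl (altStep p) p.length = p.length := by
  induction s with
  | nil => rfl
  | cons c cs ih =>
      simp only [List.foldl_cons]
      have h : altStep p p.length c = p.length := by
        simp [altStep]
      rw [h, ih]

-- main invariant: A's greedy recursion on the suffix p.drop i equals B's fold from index i
theorem matchARec_eq_foldl (s p : List Char) (i : Nat) (h : i ≤ p.length) :
    matchARec (p.drop i) s = (s.foldl (altStep p) i == p.length) := by
  induction s generalizing i with
  | nil =>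
      rcases Nat.lt_or_eq_of_le h with hlt | heq
      · obtain ⟨pc, rest, hd⟩ : ∃ pc rest, p.drop i = pc :: rest := by
          cases hdrop : p.drop i with
          | nil => exact absurd (List.drop_eq_nil_iff.mp hdrop) (Nat.not_le_of_lt hlt)
          | cons a l => exact ⟨a, l, rfl⟩
        rw [hd]
        simp [matchARec, Nat.ne_of_lt hlt]
      · subst heq
        simp [List.drop_length, matchARec]
  | cons c cs ih =>
      rcases Nat.lt_or_eq_of_le h with hlt | heq
      · have hget : p[i]? = some p[i] := List.getElem?_eq_getElem hlt
        have hd : p.drop i = p[i] :: p.drop (i + 1) := List.drop_eq_getElem_cons hlt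
        simp only [List.foldl_cons, altStep, hget]
        by_cases hc : (p[i] == c || p[i] == '.') = true
        · rw [hd]
          simp only [matchARec, hc]
          exact ih (i + 1) hlt
        · rw [hd]
          simp only [matchARec, hc, Bool.false_eq_true, if_false]
          rw [← hd]
          exact ih i (Nat.le_of_lt hlt)
      · subst heq
        simp only [List.drop_length, matchARec, List.foldl_cons]
        have h1 : altStep p p.length c = p.length := by
          simp [altStep]
        rw [h1, foldl_altStep_full]
        simp

-- ===== VERDICT (by name: the statement is the Claim_ definition above) =====
theorem match_func_spec : Claim_equal_match_func := by
  intro pattern search_str _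
  unfold Spec_match_func match_func match_func_alt
  have := matchARec_eq_foldl search_str.toList pattern.toList 0 (Nat.zero_le _)
  simpa using this
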